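-- pv_equiv track=rewrite | github.com/TheZenNinja/CYB210 | Chapter8/Part 2/examples.py | neighborCount
-- ===== SOURCE A (Python) =====
-- def neighborCount(text):
--     nbDict = {}
--     text = text.lower ()
--     for i in range(len(text) -1):
--         nbList = nbDict.setdefault(text [i], [])
--         maybeAdd(text [i+1], nbList)
--         nbList = nbDict.setdefault(text [i +1], [])
--         maybeAdd(text [i], nbList)
--     for key in nbDict :
--         nbDict[key] = len(nbDict[key])
--     return nbDict
--
-- def maybeAdd(ch, toList):
--     if ch in 'abcdefghijklmnopqrstuvwxyz' and ch not in toList: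
--         toList.append (ch)
-- ===== SOURCE B (Python) =====
-- def neighborCount(text):
--     lo = text.lower()
--     letters = 'abcdefghijklmnopqrstuvwxyz'
--     counts = {}
--     if len(lo) > 1:
--         for c in lo:
--             if c not in counts:
--                 counts[c] = sum(1 for x in letters
--                                 if c + x in lo or x + c in lo)
--     return counts
-- ===== Notes on version B (the rewrite author's own statement) =====
-- stated objective: alternative
-- what changed: A streams once over adjacent positions, growing a membership-checked dedup list of alphabetic neighbors per dict key and finally replacing each list by its length; B never accumulates neighbor collections at all: for each first-occurrence character c it probes the 26-letter alphabet and counts the letters x whose 2-gram c+x or x+c occurs as a substring of the lowered text.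
import Mathlib
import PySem

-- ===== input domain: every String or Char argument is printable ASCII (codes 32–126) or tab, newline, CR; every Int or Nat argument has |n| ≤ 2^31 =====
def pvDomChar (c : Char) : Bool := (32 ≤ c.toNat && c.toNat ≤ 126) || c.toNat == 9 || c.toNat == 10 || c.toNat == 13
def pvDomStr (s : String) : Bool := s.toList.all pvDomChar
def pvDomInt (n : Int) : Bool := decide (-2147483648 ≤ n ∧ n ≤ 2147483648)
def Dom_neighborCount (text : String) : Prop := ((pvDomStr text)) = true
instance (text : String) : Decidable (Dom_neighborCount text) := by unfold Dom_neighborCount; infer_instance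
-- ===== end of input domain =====

-- B replaces A's streaming accumulation of per-key dedup neighbor lists by an alphabet probe:
-- for each first-occurrence character c it counts the letters x whose 2-gram c+x or x+c occurs
-- as a substring of the lowered text (alternative algorithm, not claimed faster). Python's
-- 1-character dict keys are modeled as Char and rendered as 1-character Strings on output.

-- ===== PORT A =====
def ncLetters : List Char := "abcdefghijklmnopqrstuvwxyz".toList

-- `ch in 'abcdefghijklmnopqrstuvwxyz'`: ch is always a single character here, so Python's
-- substring test is exactly character membership.
def ncMaybeAdd (ch : Char) (toList : List Char) : List Char :=
  if ncLetters.contains ch ∧ ¬ toList.contains ch then toList ++ [ch] else toList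

-- one iteration of A's loop body: two setdefault-then-mutate steps (the in-place mutation of
-- the aliased list is written back with insert)
def ncStepA (d : PySem.Dict Char (List Char)) (a b : Char) : PySem.Dict Char (List Char) :=
  let d := d.setdefault a []
  let d := d.insert a (ncMaybeAdd b (d.getD a []))
  let d := d.setdefault b []
  d.insert b (ncMaybeAdd a (d.getD b []))

def neighborCount (text : String) : List (String × Int) :=
  let lo := (PySem.Str.lower text).toList
  -- the indices produced by range(len(text) - 1) are always in range, so pyGetD's default ' '
  -- is never used
  let d := (PySem.List.pyRange 0 ((lo.length : Int) - 1) 1).foldl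
    (fun d i => ncStepA d (PySem.List.pyGetD lo i ' ') (PySem.List.pyGetD lo (i + 1) ' '))
    PySem.Dict.empty
  d.items.map (fun p => (String.mk [p.1], (p.2.length : Int)))

-- ===== PORT B =====
-- `c + x in lo or x + c in lo`: Python substring containment, exact via PySem.Chars.isIn
def ncAdj (lo : List Char) (c x : Char) : Bool :=
  PySem.Chars.isIn [c, x] lo || PySem.Chars.isIn [x, c] lo

-- `sum(1 for x in letters if ...)`
def ncCount (lo : List Char) (c : Char) : Int :=
  ncLetters.foldl (fun n x => if ncAdj lo c x then n + 1 else n) 0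

def neighborCount_alt (text : String) : List (String × Int) :=
  let lo := (PySem.Str.lower text).toList
  let counts :=
    if 1 < lo.length then
      lo.foldl (fun d c => if d.contains c then d else d.insert c (ncCount lo c))
        PySem.Dict.empty
    else PySem.Dict.empty
  counts.items.map (fun p => (String.mk [p.1], p.2))

-- ===== PRECONDITION & SPEC =====
def Spec_neighborCount (text : String) (out : List (String × Int)) : Prop := out = neighborCount_alt text
instance (text : String) (out : List (String × Int)) : Decidable (Spec_neighborCount text out) := by unfold Spec_neighborCount; infer_instance

-- ===== CLAIM (what is proved, stated in full; the proofs are below) =====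
def Claim_equal_neighborCount : Prop := ∀ (text : String), Dom_neighborCount text → Spec_neighborCount text (neighborCount text)

-- ===== LEMMAS AND PROOFS =====

-- proof-only model of A's loop: the distinct directed (source, alphabetic neighbor) pairs
def ncStepE (e : PySem.Set (Char × Char)) (a b : Char) : PySem.Set (Char × Char) :=
  let e := if ncLetters.contains b then PySem.Set.add e (a, b) else e
  if ncLetters.contains a then PySem.Set.add e (b, a) else e

-- the targets recorded in the edge set for source k, in insertion order
def ncTargets (E : PySem.Set (Char × Char)) (k : Char) : List Char :=
  (E.filter (fun e => e.1 == k)).map Prod.snd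

theorem nc_setdefault_insert {d : PySem.Dict Char (List Char)} {k : Char} {w v : List Char} :
    (d.setdefault k w).insert k v = d.insert k v := by
  by_cases h : d.contains k
  · rw [PySem.Dict.setdefault_of_contains d w h]
  · rw [PySem.Dict.setdefault_of_not_contains d w (by simpa using h),
      PySem.Dict.insert_insert_self]

theorem nc_mem_targets {E : PySem.Set (Char × Char)} {k t : Char} :
    t ∈ ncTargets E k ↔ (k, t) ∈ E := by
  simp only [ncTargets, List.mem_map, List.mem_filter]
  constructor
  · rintro ⟨⟨a, b⟩, ⟨hm, hk⟩, ht⟩; simp_all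
  · intro h; exact ⟨(k, t), ⟨h, by simp⟩, rfl⟩

theorem nc_targets_add {E : PySem.Set (Char × Char)} {s t k : Char} :
    ncTargets (PySem.Set.add E (s, t)) k =
      if s = k ∧ (s, t) ∉ E then ncTargets E k ++ [t] else ncTargets E k := by
  by_cases hm : (s, t) ∈ E
  · simp [PySem.Set.add, PySem.Set.contains, hm]
  · simp only [PySem.Set.add, PySem.Set.contains]
    simp only [List.contains_iff_mem] at *
    by_cases hk : s = k
    · subst hk; simp [ncTargets, List.filter_append, hm]
    · simp [ncTargets, List.filter_append, hk, hm]

theorem nc_targets_add_ne {E : PySem.Set (Char × Char)} {s t k : Char} (h : s ≠ k) :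
    ncTargets (PySem.Set.add E (s, t)) k = ncTargets E k := by
  rw [nc_targets_add]; simp [h]

theorem ncStepA_eq (d : PySem.Dict Char (List Char)) (a b : Char) :
    ncStepA d a b =
      (d.insert a (ncMaybeAdd b (d.getD a []))).insert b
        (ncMaybeAdd a ((d.insert a (ncMaybeAdd b (d.getD a []))).getD b [])) := by
  simp only [ncStepA, PySem.Dict.getD_setdefault_self, nc_setdefault_insert]

theorem nc_step_keys (d : PySem.Dict Char (List Char)) (present : PySem.Set Char)
    (h1 : d.keys = present) (a b : Char) (va vb : List Char) :
    ((d.insert a va).insert b vb).keys = PySem.Set.add (PySem.Set.add present a) b := by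
  have k1 : (d.insert a va).keys = PySem.Set.add present a := by
    by_cases hma : a ∈ present
    · rw [PySem.Dict.keys_insert_of_contains d va
        ((PySem.Dict.contains_iff_mem_keys d a).2 (h1 ▸ hma)), h1, PySem.Set.add_of_mem hma]
    · rw [PySem.Dict.keys_insert_of_not_contains d va
        (Bool.eq_false_iff.2 fun h => hma (h1 ▸ (PySem.Dict.contains_iff_mem_keys d a).1 h)),
        h1, PySem.Set.add_of_not_mem hma]
  by_cases hmb : b ∈ PySem.Set.add present a
  · rw [PySem.Dict.keys_insert_of_contains _ vb
      ((PySem.Dict.contains_iff_mem_keys _ b).2 (k1 ▸ hmb)), k1, PySem.Set.add_of_mem hmb]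
  · rw [PySem.Dict.keys_insert_of_not_contains _ vb
      (Bool.eq_false_iff.2 fun h => hmb (k1 ▸ (PySem.Dict.contains_iff_mem_keys _ b).1 h)),
      k1, PySem.Set.add_of_not_mem hmb]

theorem nc_step_getD (d : PySem.Dict Char (List Char)) (edges : PySem.Set (Char × Char))
    (h2 : ∀ k, d.getD k [] = ncTargets edges k) (a b k : Char) :
    ((d.insert a (ncMaybeAdd b (d.getD a []))).insert b
        (ncMaybeAdd a ((d.insert a (ncMaybeAdd b (d.getD a []))).getD b []))).getD k []
      = ncTargets (ncStepE edges a b) k := by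
  rw [PySem.Dict.getD_insert, PySem.Dict.getD_insert, PySem.Dict.getD_insert]
  simp only [h2]
  unfold ncStepE
  have hpair : ∀ x y : Char, x ≠ y → ((x, y) : Char × Char) ≠ (y, x) := by
    intro x y hxy h
    exact hxy (congrArg Prod.fst h)
  by_cases hLb : b ∈ ncLetters
  · have hcb : ncLetters.contains b = true := List.contains_iff_mem.2 hLb
    by_cases hLa : a ∈ ncLetters
    · -- both letters
      have hca : ncLetters.contains a = true := List.contains_iff_mem.2 hLa
      simp only [hcb, hca, if_true]
      by_cases hab : a = b
      · subst hab
        rw [PySem.Set.add_of_mem ((PySem.Set.mem_add _ _ _).2 (Or.inr rfl))]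
        by_cases hk : k = a
        · subst hk
          rw [nc_targets_add]
          by_cases hm : (k, k) ∈ edges
          · have hmm : k ∈ ncTargets edges k := nc_mem_targets.2 hm
            simp [ncMaybeAdd, hm, hmm]
          · have hnm : k ∉ ncTargets edges k := fun h => hm (nc_mem_targets.1 h)
            simp [ncMaybeAdd, hm, hLa, hnm]
        · rw [nc_targets_add_ne (fun h : a = k => hk h.symm)]
          simp [hk]
      · by_cases hk : k = b
        · subst hk
          have hka : ¬ k = a := fun h => hab h.symm
          rw [nc_targets_add]
          have hmem : ((k, a) ∈ PySem.Set.add edges (a, k)) ↔ (k, a) ∈ edges := by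
            rw [PySem.Set.mem_add]
            exact ⟨fun h => h.resolve_right
              (fun h' => hpair k a (fun h'' => hab h''.symm) h'), Or.inl⟩
          rw [nc_targets_add_ne hab]
          by_cases hm : (k, a) ∈ edges
          · have hmm : a ∈ ncTargets edges k := nc_mem_targets.2 hm
            simp [ncMaybeAdd, hmem, hm, hmm, hka]
          · have hnm : a ∉ ncTargets edges k := fun h => hm (nc_mem_targets.1 h)
            simp [ncMaybeAdd, hmem, hm, hLa, hnm, hka]
        · by_cases hk2 : k = a
          · subst hk2
            rw [nc_targets_add_ne (fun h : b = k => hab h.symm), nc_targets_add]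
            by_cases hm : (k, b) ∈ edges
            · have hmm : b ∈ ncTargets edges k := nc_mem_targets.2 hm
              simp [ncMaybeAdd, hm, hmm, hk]
            · have hnm : b ∉ ncTargets edges k := fun h => hm (nc_mem_targets.1 h)
              simp [ncMaybeAdd, hm, hLb, hnm, hk]
          · rw [nc_targets_add_ne (fun h : b = k => hk h.symm),
              nc_targets_add_ne (fun h : a = k => hk2 h.symm)]
            simp [hk, hk2]
    · -- b letter, a not
      have hca : ncLetters.contains a = false :=
        Bool.eq_false_iff.2 (fun h => hLa (List.contains_iff_mem.1 h))
      simp only [hcb, hca, Bool.false_eq_true, if_false, if_true]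
      by_cases hab : a = b
      · subst hab; exact absurd hLb hLa
      · by_cases hk : k = b
        · subst hk
          have hka : ¬ k = a := fun h => hab h.symm
          rw [nc_targets_add_ne hab]
          simp [ncMaybeAdd, hLa, hka]
        · by_cases hk2 : k = a
          · subst hk2
            rw [nc_targets_add]
            by_cases hm : (k, b) ∈ edges
            · have hmm : b ∈ ncTargets edges k := nc_mem_targets.2 hm
              simp [ncMaybeAdd, hm, hmm, hk]
            · have hnm : b ∉ ncTargets edges k := fun h => hm (nc_mem_targets.1 h)
              simp [ncMaybeAdd, hm, hLb, hnm, hk]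
          · rw [nc_targets_add_ne (fun h : a = k => hk2 h.symm)]
            simp [hk, hk2]
  · have hcb : ncLetters.contains b = false :=
      Bool.eq_false_iff.2 (fun h => hLb (List.contains_iff_mem.1 h))
    by_cases hLa : a ∈ ncLetters
    · -- a letter, b not
      have hca : ncLetters.contains a = true := List.contains_iff_mem.2 hLa
      simp only [hcb, hca, Bool.false_eq_true, if_false, if_true]
      by_cases hab : a = b
      · subst hab; exact absurd hLa hLb
      · by_cases hk : k = b
        · subst hk
          have hka : ¬ k = a := fun h => hab h.symm
          rw [nc_targets_add]
          by_cases hm : (k, a) ∈ edges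
          · have hmm : a ∈ ncTargets edges k := nc_mem_targets.2 hm
            simp [ncMaybeAdd, hm, hmm, hka]
          · have hnm : a ∉ ncTargets edges k := fun h => hm (nc_mem_targets.1 h)
            simp [ncMaybeAdd, hm, hLa, hnm, hka]
        · by_cases hk2 : k = a
          · subst hk2
            rw [nc_targets_add_ne (fun h : b = k => hab h.symm)]
            simp [ncMaybeAdd, hLb, hk]
          · rw [nc_targets_add_ne (fun h : b = k => hk h.symm)]
            simp [hk, hk2]
    · -- neither is a letter: nothing changes
      have hca : ncLetters.contains a = false :=
        Bool.eq_false_iff.2 (fun h => hLa (List.contains_iff_mem.1 h))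
      simp only [hcb, hca, Bool.false_eq_true, if_false]
      by_cases hk : k = b
      · subst hk
        simp only [ncMaybeAdd]
        simp [hLa]
        intro h
        subst h
        simp [hLb]
      · by_cases hk2 : k = a
        · subst hk2
          simp [ncMaybeAdd, hLb, hk]
        · simp [hk, hk2]

theorem nc_pairs (cs : List Char) :
    (PySem.List.pyRange 0 ((cs.length : Int) - 1) 1).map
      (fun i => (PySem.List.pyGetD cs i ' ', PySem.List.pyGetD cs (i + 1) ' '))
    = cs.zip cs.tail := by
  cases cs with
  | nil => simp [PySem.List.pyRange]
  | cons c t =>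
    have hn : ((c :: t).length : Int) - 1 = (t.length : Int) := by simp
    rw [hn, PySem.List.pyRange_zero_natCast, List.map_map]
    apply List.ext_getElem
    · simp [List.length_zip]
    · intro i h1 h2
      simp only [List.getElem_map, Function.comp_apply, List.getElem_range, List.getElem_zip]
      simp only [List.length_map, List.length_range] at h1
      refine Prod.ext ?_ ?_ <;> simp only []
      · rw [PySem.List.pyGetD_eq_getElem _ _ (by positivity)
          (by exact_mod_cast Nat.lt_succ_of_lt h1)]
        simp
      · rw [show ((i : Int) + 1) = ((i + 1 : Nat) : Int) by push_cast; ring,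
          PySem.List.pyGetD_eq_getElem _ _ (by positivity)
            (by exact_mod_cast Nat.succ_lt_succ h1)]
        simp

theorem nc_range_to_zip {σ : Type} (cs : List Char) (f : σ → Char → Char → σ) (s : σ) :
    (PySem.List.pyRange 0 ((cs.length : Int) - 1) 1).foldl
      (fun st i => f st (PySem.List.pyGetD cs i ' ') (PySem.List.pyGetD cs (i + 1) ' ')) s
    = (cs.zip cs.tail).foldl (fun st p => f st p.1 p.2) s := by
  rw [← nc_pairs cs, List.foldl_map]

theorem nc_inv (pairs : List (Char × Char)) (d : PySem.Dict Char (List Char))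
    (present : PySem.Set Char) (edges : PySem.Set (Char × Char))
    (h1 : d.keys = present) (hnd : d.keys.Nodup)
    (h2 : ∀ k, d.getD k [] = ncTargets edges k) :
    (pairs.foldl (fun d p => ncStepA d p.1 p.2) d).keys
        = pairs.foldl (fun s p => PySem.Set.add (PySem.Set.add s p.1) p.2) present
    ∧ (pairs.foldl (fun d p => ncStepA d p.1 p.2) d).keys.Nodup
    ∧ ∀ k, (pairs.foldl (fun d p => ncStepA d p.1 p.2) d).getD k []
        = ncTargets (pairs.foldl (fun e p => ncStepE e p.1 p.2) edges) k := by
  induction pairs generalizing d present edges with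
  | nil => exact ⟨h1, hnd, h2⟩
  | cons p rest ih =>
    simp only [List.foldl_cons]
    refine ih (ncStepA d p.1 p.2) _ _ ?_ ?_ ?_
    · rw [ncStepA_eq]; exact nc_step_keys d present h1 p.1 p.2 _ _
    · rw [ncStepA_eq]
      exact PySem.Dict.nodup_keys_insert _ _ _ (PySem.Dict.nodup_keys_insert _ _ _ hnd)
    · intro k; rw [ncStepA_eq]; exact nc_step_getD d edges h2 p.1 p.2 k

-- the characters seen by the pair loop are exactly the distinct characters of the text
theorem nc_present_aux (t : List Char) : ∀ (x : Char) (S : PySem.Set Char),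
    ((x :: t).zip t).foldl (fun s p => PySem.Set.add (PySem.Set.add s p.1) p.2)
      (PySem.Set.add S x) = PySem.Set.update S (x :: t) := by
  induction t with
  | nil => intro x S; simp [PySem.Set.update]
  | cons y r ih =>
    intro x S
    simp only [List.zip_cons_cons, List.foldl_cons]
    rw [PySem.Set.add_of_mem (show x ∈ PySem.Set.add S x from
      (PySem.Set.mem_add _ _ _).2 (Or.inr rfl))]
    rw [ih y (PySem.Set.add S x)]
    simp [PySem.Set.update_cons]

theorem nc_present (a b : Char) (r : List Char) :
    ((a :: b :: r).zip (b :: r)).foldl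
      (fun s p => PySem.Set.add (PySem.Set.add s p.1) p.2) PySem.Set.empty
    = PySem.Set.ofList (a :: b :: r) := by
  simp only [List.zip_cons_cons, List.foldl_cons]
  rw [nc_present_aux r b (PySem.Set.add PySem.Set.empty a), ← PySem.Set.update_cons]
  exact PySem.Set.update_nil_left _

-- membership in the edge set ↔ the 2-gram occurs among adjacent pairs and the target is a letter
theorem nc_mem_stepE (E : PySem.Set (Char × Char)) (a b c x : Char) :
    (c, x) ∈ ncStepE E a b ↔
      (c, x) ∈ E ∨ (x ∈ ncLetters ∧ ((a, b) = (c, x) ∨ (a, b) = (x, c))) := by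
  unfold ncStepE
  by_cases hb : b ∈ ncLetters <;> by_cases ha : a ∈ ncLetters <;>
    simp [hb, ha, PySem.Set.mem_add, Prod.ext_iff] <;>
    aesop

theorem nc_mem_edges (pairs : List (Char × Char)) (E : PySem.Set (Char × Char)) (c x : Char) :
    (c, x) ∈ pairs.foldl (fun e p => ncStepE e p.1 p.2) E ↔
      (c, x) ∈ E ∨ (x ∈ ncLetters ∧ ∃ p ∈ pairs, p = (c, x) ∨ p = (x, c)) := by
  induction pairs generalizing E with
  | nil => simp
  | cons q t ih =>
    simp only [List.foldl_cons]
    rw [ih, nc_mem_stepE]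
    obtain ⟨a, b⟩ := q
    simp only [List.mem_cons]
    constructor
    · rintro (((h | ⟨hx, h⟩) | ⟨hx, p, hp, h⟩))
      · exact Or.inl h
      · exact Or.inr ⟨hx, (a, b), Or.inl rfl, by tauto⟩
      · exact Or.inr ⟨hx, p, Or.inr hp, h⟩
    · rintro (h | ⟨hx, p, (rfl | hp), h⟩)
      · exact Or.inl (Or.inl h)
      · exact Or.inl (Or.inr ⟨hx, by tauto⟩)
      · exact Or.inr ⟨hx, p, hp, h⟩

theorem nc_infix_iff (lo : List Char) (c x : Char) :
    [c, x] <:+: lo ↔ (c, x) ∈ lo.zip lo.tail := by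
  induction lo with
  | nil => simp
  | cons a t ih =>
    rw [List.infix_cons_iff]
    cases t with
    | nil =>
      simp [List.cons_prefix_cons]
    | cons b r =>
      simp only [List.tail_cons, List.zip_cons_cons, List.mem_cons] at ih ⊢
      rw [List.cons_prefix_cons]
      constructor
      · rintro (⟨rfl, hp⟩ | h)
        · rcases List.cons_prefix_cons.1 hp with ⟨rfl, _⟩
          exact Or.inl rfl
        · exact Or.inr ((show [c,x] <:+: b :: r ↔ _ from ih).1 h)
      · rintro (h | h)
        · obtain ⟨rfl, rfl⟩ := Prod.mk.injEq .. ▸ h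
          · exact Or.inl ⟨rfl, List.cons_prefix_cons.2 ⟨rfl, List.nil_prefix⟩⟩
        · exact Or.inr (ih.2 h)

theorem nc_adj_iff (lo : List Char) (c x : Char) :
    ncAdj lo c x = true ↔ ∃ p ∈ lo.zip lo.tail, p = (c, x) ∨ p = (x, c) := by
  simp only [ncAdj, Bool.or_eq_true, PySem.Chars.isIn_iff_infix, nc_infix_iff]
  constructor
  · rintro (h | h)
    · exact ⟨(c, x), h, Or.inl rfl⟩
    · exact ⟨(x, c), h, Or.inr rfl⟩
  · rintro ⟨p, hp, (rfl | rfl)⟩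
    · exact Or.inl hp
    · exact Or.inr hp

theorem nc_nodup_edges (pairs : List (Char × Char)) (E : PySem.Set (Char × Char))
    (h : E.Nodup) : (pairs.foldl (fun e p => ncStepE e p.1 p.2) E).Nodup := by
  induction pairs generalizing E with
  | nil => exact h
  | cons q t ih =>
    refine ih _ ?_
    simp only [ncStepE]
    split_ifs <;> first
      | exact PySem.Set.nodup_add _ _ (PySem.Set.nodup_add _ _ h)
      | exact PySem.Set.nodup_add _ _ h
      | exact h

theorem nc_nodup_targets (E : PySem.Set (Char × Char)) (h : E.Nodup) (c : Char) :
    (ncTargets E c).Nodup := by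
  have hf : (E.filter (fun e => e.1 == c)).Nodup := h.filter _
  refine List.Nodup.map_on ?_ hf
  intro e he e' he' hsnd
  have h1 : e.1 = c := by simpa using (List.mem_filter.1 he).2
  have h2 : e'.1 = c := by simpa using (List.mem_filter.1 he').2
  exact Prod.ext (h1.trans h2.symm) hsnd

-- per-character agreement: A's dedup-list length is B's alphabet-probe count
theorem nc_count_eq (lo : List Char) (c : Char) :
    ((ncTargets ((lo.zip lo.tail).foldl (fun e p => ncStepE e p.1 p.2) PySem.Set.empty) c).length : Int)
      = ncCount lo c := by
  set E := (lo.zip lo.tail).foldl (fun e p => ncStepE e p.1 p.2) PySem.Set.empty with hE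
  have hperm : (ncTargets E c).Perm (ncLetters.filter (fun x => ncAdj lo c x)) := by
    rw [List.perm_ext_iff_of_nodup
      (nc_nodup_targets E (nc_nodup_edges _ _ List.nodup_nil) c)
      (List.Nodup.filter _ (by decide))]
    intro x
    rw [nc_mem_targets, hE, nc_mem_edges, List.mem_filter, nc_adj_iff]
    simp [PySem.Set.empty]
  rw [ncCount, PySem.List.foldl_count_if, List.countP_eq_length_filter, hperm.length_eq]
  simp

-- B's dict-building loop over first occurrences
theorem nc_buildB (f : Char → Int) (xs : List Char) : ∀ (S : PySem.Set Char)
    (d : PySem.Dict Char Int), S.Nodup → d.items = S.map (fun c => (c, f c)) →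
    (xs.foldl (fun d c => if d.contains c then d else d.insert c (f c)) d).items
      = (PySem.Set.update S xs).map (fun c => (c, f c)) := by
  induction xs with
  | nil => intro S d _ hd; simp only [List.foldl_nil, PySem.Set.update, hd]
  | cons x t ih =>
    intro S d hS hd
    have hkeys : d.keys = S := by
      simp only [PySem.Dict.keys, hd, List.map_map]
      exact (List.map_congr_left (fun c _ => rfl)).trans (List.map_id S)
    simp only [List.foldl_cons]
    rw [PySem.Set.update_cons]
    by_cases hx : x ∈ S
    · rw [if_pos ((PySem.Dict.contains_iff_mem_keys d x).2 (hkeys ▸ hx)),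
        PySem.Set.add_of_mem hx]
      exact ih S d hS hd
    · have hc : d.contains x = false :=
        Bool.eq_false_iff.2 fun h => hx (hkeys ▸ (PySem.Dict.contains_iff_mem_keys d x).1 h)
      rw [if_neg (by simp [hc]), PySem.Set.add_of_not_mem hx]
      refine ih (S ++ [x]) _ ?_ ?_
      · exact List.Nodup.append hS (List.nodup_singleton x) (by simpa using hx)
      · rw [PySem.Dict.items_insert_of_not_contains _ _ hc, hd]; simp

theorem nc_main (text : String) : neighborCount text = neighborCount_alt text := by
  simp only [neighborCount, neighborCount_alt]
  rw [nc_range_to_zip ((PySem.Str.lower text).toList) ncStepA]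
  set lo := (PySem.Str.lower text).toList with hlo
  match hsh : lo with
  | [] => simp [PySem.Dict.empty]
  | [c] => simp [PySem.Dict.empty]
  | a :: b :: r =>
    have hlen : 1 < (a :: b :: r).length := by simp
    rw [if_pos hlen]
    obtain ⟨hkeys, hnodA, hgetD⟩ := nc_inv ((a :: b :: r).zip (a :: b :: r).tail)
      PySem.Dict.empty PySem.Set.empty PySem.Set.empty
      (by simp [PySem.Dict.keys_empty, PySem.Set.empty])
      (by simp)
      (by intro k; simp [PySem.Dict.getD_empty, ncTargets, PySem.Set.empty])
    rw [PySem.Dict.items_eq_map_keys _ hnodA ([] : List Char), hkeys]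
    rw [nc_buildB (ncCount (a :: b :: r)) (a :: b :: r) PySem.Set.empty PySem.Dict.empty
      List.nodup_nil (by simp [PySem.Dict.empty, PySem.Set.empty])]
    rw [PySem.Set.update_empty]
    simp only [List.tail_cons] at hgetD ⊢
    rw [show ((a :: b :: r).zip (b :: r)).foldl
        (fun s p => PySem.Set.add (PySem.Set.add s p.1) p.2) PySem.Set.empty
      = PySem.Set.ofList (a :: b :: r) from nc_present a b r]
    rw [List.map_map, List.map_map]
    apply List.map_congr_left
    intro k _
    simp only [Function.comp_apply]
    rw [hgetD k]
    rw [show ((ncTargets ((( a :: b :: r).zip (b :: r)).foldl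
        (fun e p => ncStepE e p.1 p.2) PySem.Set.empty) k).length : Int)
      = ncCount (a :: b :: r) k from nc_count_eq (a :: b :: r) k]

-- ===== VERDICT (by name: the statement is the Claim_ definition above) =====
theorem neighborCount_spec : Claim_equal_neighborCount := by
  intro text _
  unfold Spec_neighborCount
  exact nc_main text
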